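-- pv_equiv track=rewrite | github.com/OranPie/Re-LootPlusPlus | tools/drop_coverage.py | split_lines
-- ===== SOURCE A (Python) =====
-- from typing import List, Optional, Tuple
--
-- CONTINUATION_END = {"\\", "(", "[", ",", ";"}
--
-- CONTINUATION_START = {")", "]"}
--
-- def split_lines(lines: List[str]) -> List[str]:
--     out = []
--     combined = ""
--     prev_line = None
--     for line_init in lines:
--         line = line_init.strip()
--         if not line or line.startswith("/"):
--             continue
--         is_cont = False
--         if prev_line is not None:
--             if prev_line and prev_line[-1] in CONTINUATION_END:
--                 is_cont = True
--             if line and line[0] in CONTINUATION_START: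
--                 is_cont = True
--         line_contents = line[:-1].strip() if line.endswith("\\") else line
--         if not is_cont and combined:
--             out.append(combined)
--             combined = line_contents
--         else:
--             combined += line_contents
--         prev_line = line
--     if combined:
--         out.append(combined)
--     return out
-- ===== SOURCE B (Python) =====
-- from typing import List
--
-- CONTINUATION_END = {"\\", "(", "[", ",", ";"}
--
-- CONTINUATION_START = {")", "]"}
--
-- def _content(l):
--     return l[:-1].strip() if l.endswith("\\") else l
--
-- def _is_cont(p, c):
--     return p[-1] in CONTINUATION_END or c[0] in CONTINUATION_START
--
-- def split_lines(lines):
--     # Segment the kept lines into maximal continuation runs, join each run's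
--     # contents, and keep the nonempty joins.  No accumulator state is needed:
--     # at a non-continuation line A resets its buffer either way, so the groups
--     # are exactly the runs and A emits precisely the nonempty ones.
--     kept = [s for s in (l.strip() for l in lines) if s and not s.startswith("/")]
--     n = len(kept)
--     groups = []
--     i = 0
--     while i < n:
--         j = i + 1
--         while j < n and _is_cont(kept[j - 1], kept[j]):
--             j += 1
--         groups.append("".join(map(_content, kept[i:j])))
--         i = j
--     return [g for g in groups if g]
-- ===== Notes on version B (the rewrite author's own statement) =====
-- stated objective: alternative
-- what changed: A's single stateful pass (accumulator string, prev-line variable and a mid-loop 'combined nonempty' flush test) is replaced by run segmentation: filter the kept lines, then recursively cut them into maximal continuation runs, join each run's contents, and drop empty joins at the end; correctness rests on the fact that at a run boundary A's two branches both reset the buffer to the new line's content, so A emits exactly the nonempty run-joins.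
import Mathlib
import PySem

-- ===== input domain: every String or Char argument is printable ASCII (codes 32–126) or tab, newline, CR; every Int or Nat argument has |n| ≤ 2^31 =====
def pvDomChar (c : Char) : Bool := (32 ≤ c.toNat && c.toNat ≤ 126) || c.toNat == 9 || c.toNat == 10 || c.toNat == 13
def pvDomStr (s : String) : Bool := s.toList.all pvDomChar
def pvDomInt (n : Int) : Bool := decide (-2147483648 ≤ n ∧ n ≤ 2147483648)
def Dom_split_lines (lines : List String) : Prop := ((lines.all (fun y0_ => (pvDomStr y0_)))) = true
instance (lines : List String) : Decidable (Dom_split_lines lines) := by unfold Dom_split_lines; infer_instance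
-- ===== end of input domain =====

-- B replaces A's stateful accumulator loop by segmentation into maximal continuation runs
-- (recursive: take a run, join its contents, recurse; drop empty joins at the end);
-- objective: alternative decomposition, same cost.

-- ===== PORT A =====
-- strings handled as List Char (PySem.Chars); out accumulates char lists, converted at the end
def contEndA : List Char := ['\\', '(', '[', ',', ';']
def contStartA : List Char := [')', ']']

-- one iteration of A's for-loop; state = (out, combined, prev_line)
def stepA (st : List (List Char) × List Char × Option (List Char)) (line_init : String) :
    List (List Char) × List Char × Option (List Char) :=
  let line := PySem.Chars.strip line_init.toList
  if line.isEmpty || PySem.Chars.startswith line ['/'] then st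
  else
    let (out, combined, prev) := st
    let is_cont : Bool :=
      match prev with
      | none => false
      | some p => (p.getLast?.elim false contEndA.contains)
                  || (line.head?.elim false contStartA.contains)
    let line_contents :=
      if PySem.Chars.endswith line ['\\'] then
        PySem.Chars.strip (PySem.List.slice line none (some (-1)))
      else line
    if !is_cont && !combined.isEmpty then
      (out ++ [combined], line_contents, some line)
    else
      (out, combined ++ line_contents, some line)

def split_lines (lines : List String) : List String :=
  let r := lines.foldl stepA ([], [], none)
  let out := if !r.2.1.isEmpty then r.1 ++ [r.2.1] else r.1
  out.map String.ofList

-- ===== PORT B =====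
def contEndB : List Char := ['\\', '(', '[', ',', ';']
def contStartB : List Char := [')', ']']

-- l[:-1].strip() if l.endswith("\\") else l
def contentB (l : List Char) : List Char :=
  if PySem.Chars.endswith l ['\\'] then PySem.Chars.strip (PySem.List.slice l none (some (-1)))
  else l

-- p[-1] in CONTINUATION_END or c[0] in CONTINUATION_START (kept lines are nonempty)
def isContB (p c : List Char) : Bool :=
  (p.getLast?.elim false contEndB.contains) || (c.head?.elim false contStartB.contains)

-- B's inner while loop: length of the maximal continuation run following the line `p`
def runLenB : List Char → List (List Char) → Nat
  | _, [] => 0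
  | p, c :: cs => if isContB p c then runLenB c cs + 1 else 0

-- B's recursive grouping: one maximal run joined, then recurse on the remainder
def groupsB : List (List Char) → List (List Char)
  | [] => []
  | x :: xs =>
      let n := runLenB x xs
      (((x :: xs).take (n + 1)).map contentB).flatten :: groupsB ((x :: xs).drop (n + 1))
termination_by ls => ls.length
decreasing_by
  simp only [List.length_drop, List.length_cons]
  omega

-- kept-line predicate: s and not s.startswith("/")
def keptP (s : List Char) : Bool := !s.isEmpty && !PySem.Chars.startswith s ['/']

def split_lines_alt (lines : List String) : List String :=
  let kept := (lines.map (fun l => PySem.Chars.strip l.toList)).filter keptP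
  ((groupsB kept).filter (fun g => !g.isEmpty)).map String.ofList

-- ===== PRECONDITION & SPEC =====
def Spec_split_lines (lines : List String) (out : List String) : Prop := out = split_lines_alt lines
instance (lines : List String) (out : List String) : Decidable (Spec_split_lines lines out) := by unfold Spec_split_lines; infer_instance

-- ===== CLAIM (what is proved, stated in full; the proofs are below) =====
def Claim_equal_split_lines : Prop := ∀ (lines : List String), Dom_split_lines lines → Spec_split_lines lines (split_lines lines)

-- ===== LEMMAS AND PROOFS =====

-- A's loop body specialised to an already-stripped, kept line
def stepA' (st : List (List Char) × List Char × Option (List Char)) (line : List Char) :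
    List (List Char) × List Char × Option (List Char) :=
  let (out, combined, prev) := st
  let is_cont : Bool :=
    match prev with
    | none => false
    | some p => isContB p line
  let line_contents := contentB line
  if !is_cont && !combined.isEmpty then
    (out ++ [combined], line_contents, some line)
  else
    (out, combined ++ line_contents, some line)

lemma stepA_eq (st : List (List Char) × List Char × Option (List Char)) (l : String) :
    stepA st l =
      if keptP (PySem.Chars.strip l.toList) then stepA' st (PySem.Chars.strip l.toList) else st := by
  obtain ⟨o, c, p⟩ := st
  simp only [stepA, stepA', keptP, contentB, isContB, contEndA, contEndB, contStartA, contStartB]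
  by_cases h1 : (PySem.Chars.strip l.toList).isEmpty <;>
    by_cases h2 : PySem.Chars.startswith (PySem.Chars.strip l.toList) ['/'] <;>
      simp [h1, h2]

lemma foldl_stepA_filter (lines : List String) (st : List (List Char) × List Char × Option (List Char)) :
    lines.foldl stepA st =
      ((lines.map (fun l => PySem.Chars.strip l.toList)).filter keptP).foldl stepA' st := by
  induction lines generalizing st with
  | nil => rfl
  | cons l ls ih =>
      simp only [List.foldl_cons, List.map_cons, List.filter_cons, stepA_eq]
      by_cases h : keptP (PySem.Chars.strip l.toList)
      · simp [h, ih]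
      · simp [h, ih]

-- span form of B's run extraction: (joined contents of the run, remainder)
def takeRunJ : List Char → List (List Char) → List Char × List (List Char)
  | _, [] => ([], [])
  | p, c :: cs =>
      if isContB p c then
        let r := takeRunJ c cs
        (contentB c ++ r.1, r.2)
      else ([], c :: cs)

lemma takeRunJ_fst (p : List Char) (xs : List (List Char)) :
    (takeRunJ p xs).1 = ((xs.take (runLenB p xs)).map contentB).flatten := by
  induction xs generalizing p with
  | nil => rfl
  | cons c cs ih =>
      simp only [takeRunJ, runLenB]
      by_cases h : isContB p c
      · simp [h, ih c, List.take_succ_cons]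
      · simp [h]

lemma takeRunJ_snd (p : List Char) (xs : List (List Char)) :
    (takeRunJ p xs).2 = xs.drop (runLenB p xs) := by
  induction xs generalizing p with
  | nil => rfl
  | cons c cs ih =>
      simp only [takeRunJ, runLenB]
      by_cases h : isContB p c
      · simp [h, ih c]
      · simp [h]

lemma groupsB_cons (x : List Char) (xs : List (List Char)) :
    groupsB (x :: xs) = (contentB x ++ (takeRunJ x xs).1) :: groupsB ((takeRunJ x xs).2) := by
  rw [groupsB, takeRunJ_fst, takeRunJ_snd]
  simp [List.take_succ_cons, List.drop_succ_cons]

def finishA (st : List (List Char) × List Char × Option (List Char)) : List (List Char) :=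
  if !st.2.1.isEmpty then st.1 ++ [st.2.1] else st.1

def filterNE (gs : List (List Char)) : List (List Char) := gs.filter (fun g => !g.isEmpty)

-- main invariant: the stateful fold equals run segmentation
lemma loop_eq (xs : List (List Char)) :
    ∀ (out : List (List Char)) (c p : List Char),
      finishA (xs.foldl stepA' (out, c, some p))
        = out ++ filterNE ((c ++ (takeRunJ p xs).1) :: groupsB ((takeRunJ p xs).2)) := by
  induction xs with
  | nil =>
      intro out c p
      simp only [List.foldl_nil, finishA, takeRunJ, groupsB, filterNE, List.filter_cons,
        List.filter_nil]
      by_cases h : c.isEmpty <;> simp [h]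
  | cons x xs ih =>
      intro out c p
      by_cases hf : isContB p x
      · -- continuation: append to combined; run continues
        have ht : takeRunJ p (x :: xs) = (contentB x ++ (takeRunJ x xs).1, (takeRunJ x xs).2) := by
          simp [takeRunJ, hf]
        have hs : stepA' (out, c, some p) x = (out, c ++ contentB x, some x) := by
          simp [stepA', hf]
        rw [List.foldl_cons, hs, ih out (c ++ contentB x) x, ht]
        simp [List.append_assoc]
      · -- run boundary: flush or start from empty; both give combined = contentB x
        have ht : takeRunJ p (x :: xs) = ([], x :: xs) := by simp [takeRunJ, hf]
        have hnext : xs.foldl stepA' (stepA' (out, c, some p) x)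
            = xs.foldl stepA' (out ++ filterNE [c], contentB x, some x) := by
          by_cases hc : c.isEmpty
          · have : c = [] := by simpa using hc
            subst this
            simp [stepA', hf, filterNE]
          · simp [stepA', hf, hc, filterNE]
        rw [List.foldl_cons, hnext, ih (out ++ filterNE [c]) (contentB x) x, ht, groupsB_cons]
        simp only [filterNE, List.filter_cons, List.append_nil]
        by_cases hc : c.isEmpty
        · have : c = [] := by simpa using hc
          subst this
          simp
        · simp [hc, List.append_assoc]

-- the full loop over the kept lines
lemma fold_groups (kept : List (List Char)) :
    finishA (kept.foldl stepA' ([], [], none)) = filterNE (groupsB kept) := by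
  cases kept with
  | nil => simp [finishA, filterNE, groupsB]
  | cons x xs =>
      have h0 : stepA' ([], [], none) x = ([], contentB x, some x) := by
        simp [stepA']
      rw [List.foldl_cons, h0, loop_eq xs [] (contentB x) x, groupsB_cons]
      simp [filterNE]

-- ===== VERDICT (by name: the statement is the Claim_ definition above) =====
theorem split_lines_spec : Claim_equal_split_lines := by
  intro lines _
  unfold Spec_split_lines
  simp only [split_lines, split_lines_alt]
  rw [foldl_stepA_filter]
  have h := fold_groups ((lines.map (fun l => PySem.Chars.strip l.toList)).filter keptP)
  simp only [finishA, filterNE] at h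
  rw [h]
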